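-- pv_equiv track=rewrite | github.com/luiscalva-lpsr/class-sample | 6-3CaesarsCipher/PS9.py | getReorderedLowercaseAlphabet
-- ===== SOURCE A (Python) =====
-- import string
--
-- def getReorderedLowercaseAlphabet(key):
-- 	alphabet = string.ascii_lowercase
-- 	lowerCase = []
-- 	letter = 0
-- 	while letter != 26:
-- 		lowerCase.append(alphabet[(key+letter) % 26])
-- 		letter = letter + 1
-- 	return lowerCase
-- ===== SOURCE B (Python) =====
-- import string
--
-- def getReorderedLowercaseAlphabet(key):
-- 	k = key % 26
-- 	rotated = string.ascii_lowercase[k:] + string.ascii_lowercase[:k]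
-- 	return list(rotated)
-- ===== Notes on version B (the rewrite author's own statement) =====
-- stated objective: idiomatic
-- what changed: Replaces the 26-step per-element modular-index while-loop with a single key % 26 reduction followed by whole-string slice-and-concatenate rotation of ascii_lowercase, returned via list().
import Mathlib
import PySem

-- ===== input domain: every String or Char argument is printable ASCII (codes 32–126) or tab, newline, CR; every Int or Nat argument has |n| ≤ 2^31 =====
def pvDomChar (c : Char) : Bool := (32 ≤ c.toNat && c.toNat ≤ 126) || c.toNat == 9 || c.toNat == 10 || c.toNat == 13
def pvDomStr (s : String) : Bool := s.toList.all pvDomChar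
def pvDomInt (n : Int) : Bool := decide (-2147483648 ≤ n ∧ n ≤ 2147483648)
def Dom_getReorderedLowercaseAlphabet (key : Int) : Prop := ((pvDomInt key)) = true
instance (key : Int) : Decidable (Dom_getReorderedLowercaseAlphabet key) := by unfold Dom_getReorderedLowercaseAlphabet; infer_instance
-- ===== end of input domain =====

-- B replaces A's 26-step modular-index loop with key % 26 plus a slice-and-concatenate rotation (idiomatic; same behaviour).

-- ===== PORT A =====
-- while letter != 26 over letter = 0..25, appending alphabet[(key+letter) % 26];
-- the index is always in [0,26) (PySem.Int.mod with positive divisor), so the .getD "" default is never used.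
def getReorderedLowercaseAlphabet (key : Int) : List String :=
  let alphabet := "abcdefghijklmnopqrstuvwxyz"
  (List.range 26).foldl
    (fun acc letter =>
      acc ++ [((PySem.Str.pyGet? alphabet (PySem.Int.mod (key + letter) 26)).map
                (fun c => String.ofList [c])).getD ""])
    []

-- ===== PORT B =====
def getReorderedLowercaseAlphabet_alt (key : Int) : List String :=
  let k := PySem.Int.mod key 26
  let rotated := PySem.Str.slice "abcdefghijklmnopqrstuvwxyz" (some k) none
                 ++ PySem.Str.slice "abcdefghijklmnopqrstuvwxyz" none (some k)
  rotated.toList.map (fun c => String.ofList [c])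

-- ===== PRECONDITION & SPEC =====
def Spec_getReorderedLowercaseAlphabet (key : Int) (out : List String) : Prop := out = getReorderedLowercaseAlphabet_alt key
instance (key : Int) (out : List String) : Decidable (Spec_getReorderedLowercaseAlphabet key out) := by unfold Spec_getReorderedLowercaseAlphabet; infer_instance

-- ===== CLAIM (what is proved, stated in full; the proofs are below) =====
def Claim_equal_getReorderedLowercaseAlphabet : Prop := ∀ (key : Int), Dom_getReorderedLowercaseAlphabet key → Spec_getReorderedLowercaseAlphabet key (getReorderedLowercaseAlphabet key)

-- ===== LEMMAS AND PROOFS =====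

-- Both ports depend on key only through key % 26.
theorem pvFoldl_fun_congr {α β : Type} (f g : α → β → α) (l : List β) (init : α)
    (h : ∀ a b, f a b = g a b) : l.foldl f init = l.foldl g init := by
  induction l generalizing init with
  | nil => rfl
  | cons x xs ih => simp only [List.foldl_cons, h]; exact ih _

theorem pvA_mod (key : Int) :
    getReorderedLowercaseAlphabet key = getReorderedLowercaseAlphabet (PySem.Int.mod key 26) := by
  unfold getReorderedLowercaseAlphabet
  refine pvFoldl_fun_congr _ _ _ _ (fun acc letter => ?_)
  have h : PySem.Int.mod (key + (letter : Int)) 26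
         = PySem.Int.mod (PySem.Int.mod key 26 + (letter : Int)) 26 := by
    rw [PySem.Int.mod_eq_emod_of_pos (by norm_num),
        PySem.Int.mod_eq_emod_of_pos (by norm_num),
        PySem.Int.mod_eq_emod_of_pos (by norm_num), Int.emod_add_emod]
  rw [h]

theorem pvB_mod (key : Int) :
    getReorderedLowercaseAlphabet_alt key = getReorderedLowercaseAlphabet_alt (PySem.Int.mod key 26) := by
  unfold getReorderedLowercaseAlphabet_alt
  have h : PySem.Int.mod (PySem.Int.mod key 26) 26 = PySem.Int.mod key 26 := by
    rw [PySem.Int.mod_eq_emod_of_pos (by norm_num),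
        PySem.Int.mod_eq_emod_of_pos (by norm_num), Int.emod_emod_of_dvd _ dvd_rfl]
  rw [h]

set_option maxHeartbeats 2000000 in
theorem pvEq_small : ∀ r : Int, 0 ≤ r → r < 26 →
    getReorderedLowercaseAlphabet r = getReorderedLowercaseAlphabet_alt r := by
  intro r h0 h1
  interval_cases r <;> decide

-- ===== VERDICT (by name: the statement is the Claim_ definition above) =====
theorem getReorderedLowercaseAlphabet_spec : Claim_equal_getReorderedLowercaseAlphabet := by
  intro key _
  unfold Spec_getReorderedLowercaseAlphabet
  rw [pvA_mod, pvB_mod]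
  exact pvEq_small _ (PySem.Int.mod_nonneg key (by norm_num)) (PySem.Int.mod_lt key (by norm_num))
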